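-- pv_equiv track=rewrite | github.com/49-3/strawberry-tidal | tidal_playlist_converter.py | extract_playlist_id
-- ===== SOURCE A (Python) =====
-- def extract_playlist_id(url):
--     url = url.strip().rstrip("/")
--
--     for prefix in ("/playlist/", "/browse/playlist/"):
--         if prefix in url:
--             return url.split(prefix)[1].split("?")[0].split("/")[0]
--
--     if len(url) == 36 and url.count("-") == 4:
--         return url
--
--     return url
-- ===== SOURCE B (Python) =====
-- def extract_playlist_id(url):
--     url = url.strip().rstrip("/")
--     i = url.find("/playlist/")
--     if i == -1:
--         return url
--     out = []
--     for c in url[i + 10:]: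
--         if c in "/?":
--             break
--         out.append(c)
--     return "".join(out)
-- ===== Notes on version B (the rewrite author's own statement) =====
-- stated objective: simpler
-- what changed: Replaces the two-prefix membership loop with three chained splits (and the dead len==36 branch) by a single find of '/playlist/' followed by one scan that takes characters up to the first '/' or '?'.
import Mathlib
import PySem

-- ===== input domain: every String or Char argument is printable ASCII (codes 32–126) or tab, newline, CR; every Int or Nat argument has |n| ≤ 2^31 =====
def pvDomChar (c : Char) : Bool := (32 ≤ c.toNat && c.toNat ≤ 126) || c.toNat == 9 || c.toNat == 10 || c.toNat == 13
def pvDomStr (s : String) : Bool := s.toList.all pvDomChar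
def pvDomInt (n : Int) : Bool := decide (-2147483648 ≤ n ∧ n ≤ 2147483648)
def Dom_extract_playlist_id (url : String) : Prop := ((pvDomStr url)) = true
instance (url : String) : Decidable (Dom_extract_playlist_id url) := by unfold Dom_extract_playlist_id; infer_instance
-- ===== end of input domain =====

-- B replaces A's two-prefix membership loop + three chained splits (and the dead len==36 branch)
-- by one find of "/playlist/" followed by a single take-until-'/'-or-'?' scan; same return value.


-- the literal "/playlist/" shared by both Pythons
def pvPl : List Char := ['/', 'p', 'l', 'a', 'y', 'l', 'i', 's', 't', '/']
-- the literal "/browse/playlist/" (A only)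
def pvBpl : List Char := ['/', 'b', 'r', 'o', 'w', 's', 'e', '/', 'p', 'l', 'a', 'y', 'l', 'i', 's', 't', '/']
-- url.strip().rstrip("/") — PySem has no right-only strip-with-chars, so rstrip("/") is
-- ported by hand as reverse/dropWhile/reverse (exact: it drops exactly the trailing run of '/')
def pvClean (url : String) : List Char :=
  ((PySem.Chars.strip url.toList).reverse.dropWhile (· == '/')).reverse

-- ===== PORT A =====
def extract_playlist_id (url : String) : String :=
  let u := pvClean url
  -- the for-loop over the two prefixes, unrolled (two iterations, each an early return);
  -- Python's [1]/[0] indexing cannot raise here (the guard puts the separator in u, and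
  -- split never returns fewer pieces), so List.getD's default [] is never used
  if PySem.Chars.isIn pvPl u then
    String.ofList ((PySem.Chars.splitOn ((PySem.Chars.splitOn ((PySem.Chars.splitOn u pvPl).getD 1 []) ['?']).getD 0 []) ['/']).getD 0 [])
  else if PySem.Chars.isIn pvBpl u then
    String.ofList ((PySem.Chars.splitOn ((PySem.Chars.splitOn ((PySem.Chars.splitOn u pvBpl).getD 1 []) ['?']).getD 0 []) ['/']).getD 0 [])
  else if u.length == 36 && PySem.Chars.count u ['-'] == 4 then
    String.ofList u
  else
    String.ofList u

-- ===== PORT B =====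
def extract_playlist_id_alt (url : String) : String :=
  let u := pvClean url
  let i := PySem.Chars.find u pvPl
  if i == -1 then String.ofList u
  else
    -- url[i+10:] with i ≥ 0 here is exactly List.drop (i.toNat + 10); the for/break/append
    -- loop is takeWhile of B's stop predicate
    String.ofList ((u.drop (i.toNat + 10)).takeWhile (fun c => !(c == '/' || c == '?')))

-- ===== PRECONDITION & SPEC =====
def Spec_extract_playlist_id (url : String) (out : String) : Prop := out = extract_playlist_id_alt url
instance (url : String) (out : String) : Decidable (Spec_extract_playlist_id url out) := by unfold Spec_extract_playlist_id; infer_instance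

-- ===== CLAIM (what is proved, stated in full; the proofs are below) =====
def Claim_equal_extract_playlist_id : Prop := ∀ (url : String), Dom_extract_playlist_id url → Spec_extract_playlist_id url (extract_playlist_id url)

-- ===== LEMMAS AND PROOFS =====

theorem pv_go_step (sep : List Char) (fuel : Nat) (c : Char) (rest cur : List Char) (acc : List (List Char)) :
    PySem.Chars.splitOn.go sep (fuel+1) (c :: rest) cur acc
    = if sep.isPrefixOf (c :: rest) then PySem.Chars.splitOn.go sep fuel (List.drop sep.length (c :: rest)) [] (cur.reverse :: acc)
      else PySem.Chars.splitOn.go sep fuel rest (c :: cur) acc := by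
  rw [PySem.Chars.splitOn.go]

theorem pv_go_nil (sep : List Char) (fuel : Nat) (cur : List Char) (acc : List (List Char)) :
    PySem.Chars.splitOn.go sep fuel [] cur acc = (cur.reverse :: acc).reverse := by
  cases fuel <;> rw [PySem.Chars.splitOn.go] <;> simp

theorem pv_go_fuel (sep : List Char) (hsep : sep ≠ []) :
    ∀ n l, l.length = n → ∀ f1 f2 cur acc, n ≤ f1 → n ≤ f2 →
      PySem.Chars.splitOn.go sep f1 l cur acc = PySem.Chars.splitOn.go sep f2 l cur acc := by
  intro n
  induction n using Nat.strong_induction_on with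
  | _ n ih =>
    intro l hl f1 f2 cur acc h1 h2
    match l with
    | [] => rw [pv_go_nil, pv_go_nil]
    | c :: rest =>
      have hsl : 1 ≤ sep.length := by cases sep <;> simp_all
      have hn : 1 ≤ n := by simp [← hl]
      obtain ⟨a, rfl⟩ : ∃ a, f1 = a + 1 := ⟨f1 - 1, by omega⟩
      obtain ⟨b, rfl⟩ : ∃ b, f2 = b + 1 := ⟨f2 - 1, by omega⟩
      rw [pv_go_step, pv_go_step]
      by_cases hp : sep.isPrefixOf (c :: rest)
      · simp only [hp, if_true]
        exact ih (n - sep.length) (by omega) _ (by simp [← hl]) a b [] _ (by omega) (by omega)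
      · simp only [hp]
        exact ih (n - 1) (by omega) rest (by simp at hl; omega) a b _ _ (by omega) (by omega)

theorem pv_go_acc (sep : List Char) :
    ∀ fuel l cur acc, PySem.Chars.splitOn.go sep fuel l cur acc
      = acc.reverse ++ PySem.Chars.splitOn.go sep fuel l cur [] := by
  intro fuel
  induction fuel with
  | zero => intro l cur acc; rw [PySem.Chars.splitOn.go, PySem.Chars.splitOn.go]; simp
  | succ f ih =>
    intro l cur acc
    match l with
    | [] => rw [pv_go_nil, pv_go_nil]; simp
    | c :: rest =>
      rw [pv_go_step, pv_go_step]
      by_cases hp : sep.isPrefixOf (c :: rest)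
      · simp only [hp, if_true]
        rw [ih _ [] (cur.reverse :: acc), ih _ [] [cur.reverse]]
        simp
      · simp only [hp]
        exact ih rest (c :: cur) acc

theorem pv_go_ne_nil (sep : List Char) :
    ∀ fuel l cur acc, PySem.Chars.splitOn.go sep fuel l cur acc ≠ [] := by
  intro fuel
  induction fuel with
  | zero => intro l cur acc; rw [PySem.Chars.splitOn.go]; simp
  | succ f ih =>
    intro l cur acc
    match l with
    | [] => rw [pv_go_nil]; simp
    | c :: rest =>
      rw [pv_go_step]
      by_cases hp : sep.isPrefixOf (c :: rest) <;> simp only [hp, if_true] <;> apply ih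

theorem pv_go_cur (sep : List Char) :
    ∀ fuel l cur, PySem.Chars.splitOn.go sep fuel l cur []
      = (cur.reverse ++ (PySem.Chars.splitOn.go sep fuel l [] []).headI)
          :: (PySem.Chars.splitOn.go sep fuel l [] []).tail := by
  intro fuel
  induction fuel with
  | zero => intro l cur; rw [PySem.Chars.splitOn.go, PySem.Chars.splitOn.go]; simp
  | succ f ih =>
    intro l cur
    match l with
    | [] => rw [pv_go_nil, pv_go_nil]; simp
    | c :: rest =>
      rw [pv_go_step, pv_go_step]
      by_cases hp : sep.isPrefixOf (c :: rest)
      · simp only [hp, if_true, List.reverse_nil]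
        rw [pv_go_acc sep f _ [] [cur.reverse], pv_go_acc sep f _ [] [[]]]
        simp
      · simp only [hp]
        rw [ih rest (c :: cur), ih rest [c]]
        simp

theorem pv_splitOn_none (sep : List Char) (hsep : sep ≠ []) :
    ∀ l, (∀ j, sep.isPrefixOf (l.drop j) = false) → PySem.Chars.splitOn l sep = [l] := by
  intro l
  induction l with
  | nil => intro _; rw [PySem.Chars.splitOn, pv_go_nil]; simp
  | cons c rest ih =>
    intro h
    rw [PySem.Chars.splitOn, pv_go_step]
    have h0 := h 0
    simp only [List.drop_zero] at h0
    simp only [h0]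
    rw [pv_go_fuel sep hsep rest.length rest rfl _ (rest.length + 1) _ _ (by simp) (by omega),
        pv_go_cur]
    have : PySem.Chars.splitOn.go sep (rest.length + 1) rest [] [] = [rest] := by
      rw [← PySem.Chars.splitOn]
      exact ih (fun j => by have := h (j+1); simpa using this)
    rw [this]
    simp

theorem pv_splitOn_first (sep : List Char) (hsep : sep ≠ []) :
    ∀ k l, sep.isPrefixOf (l.drop k) = true → (∀ j < k, sep.isPrefixOf (l.drop j) = false) →
      PySem.Chars.splitOn l sep = l.take k :: PySem.Chars.splitOn (l.drop (k + sep.length)) sep := by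
  intro k
  induction k with
  | zero =>
    intro l hp _
    simp only [List.drop_zero] at hp
    match l with
    | [] =>
      exfalso
      cases sep with
      | nil => exact hsep rfl
      | cons s st => simp [List.isPrefixOf] at hp
    | c :: rest =>
      rw [PySem.Chars.splitOn, pv_go_step]
      simp only [hp, if_true, List.reverse_nil]
      rw [pv_go_acc]
      rw [pv_go_fuel sep hsep (List.drop sep.length (c :: rest)).length _ rfl
            _ ((List.drop sep.length (c :: rest)).length + 1) _ _
            (by simp only [List.length_drop, List.length_cons]; omega) (by omega)]
      rw [← PySem.Chars.splitOn]
      simp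
  | succ k ih =>
    intro l hp hmin
    match l with
    | [] =>
      exfalso
      rw [List.drop_nil] at hp
      cases sep <;> simp_all
    | c :: rest =>
      rw [PySem.Chars.splitOn, pv_go_step]
      have h0 := hmin 0 (by omega)
      simp only [List.drop_zero] at h0
      simp only [h0]
      rw [pv_go_fuel sep hsep rest.length rest rfl _ (rest.length + 1) _ _ (by simp) (by omega),
          pv_go_cur, ← PySem.Chars.splitOn]
      rw [ih rest (by simpa using hp) (fun j hj => by have := hmin (j+1) (by omega); simpa using this)]
      have hk : k + 1 + sep.length = (k + sep.length) + 1 := by omega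
      simp [hk, List.take_succ_cons]

theorem pv_splitOn_head (c : Char) :
    ∀ l : List Char, (PySem.Chars.splitOn l [c]).headI = l.takeWhile (fun x => !(x == c)) := by
  intro l
  induction l with
  | nil => rw [PySem.Chars.splitOn, pv_go_nil]; simp
  | cons d rest ih =>
    rw [PySem.Chars.splitOn, pv_go_step]
    by_cases hd : d = c
    · have hp : List.isPrefixOf [c] (d :: rest) = true := by simp [List.isPrefixOf, hd]
      simp only [hp, if_true, List.reverse_nil]
      rw [pv_go_acc]
      simp [List.takeWhile, hd]
    · have hp : List.isPrefixOf [c] (d :: rest) = false := by simp [List.isPrefixOf]; exact fun h => (hd h.symm).elim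
      simp only [hp]
      rw [pv_go_fuel [c] (by simp) rest.length rest rfl _ (rest.length + 1) _ _ (by simp) (by omega),
          pv_go_cur, ← PySem.Chars.splitOn]
      have hdc : (d == c) = false := by simp [hd]
      simp [List.takeWhile, hdc, ih]

theorem pv_takeWhile_take (p : Char → Bool) :
    ∀ (l : List Char) (n : Nat), (∀ h : n < l.length, p l[n] = false) →
      (l.take n).takeWhile p = l.takeWhile p := by
  intro l
  induction l with
  | nil => simp
  | cons c rest ih =>
    intro n h
    match n with
    | 0 =>
      have := h (by simp)
      simp at this
      simp [List.takeWhile, this]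
    | n + 1 =>
      rw [List.take_succ_cons]
      by_cases hc : p c
      · simp [List.takeWhile, hc, ih n (fun hlt => by have := h (by simpa using Nat.succ_lt_succ hlt); simpa using this)]
      · simp at hc; simp [List.takeWhile, hc]

-- derived small facts
theorem pv_splitOn_ne_nil (l sep : List Char) : PySem.Chars.splitOn l sep ≠ [] := by
  rw [PySem.Chars.splitOn]; exact pv_go_ne_nil sep _ l [] []

theorem pv_getD0 (S : List (List Char)) (h : S ≠ []) : S.getD 0 [] = S.headI := by
  cases S with | nil => exact absurd rfl h | cons a t => rfl

-- A's chained splits applied to the piece after the first "/playlist/" equal B's single scan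
theorem pv_chain (b : List Char) :
    (PySem.Chars.splitOn ((PySem.Chars.splitOn (PySem.Chars.splitOn b pvPl).headI ['?']).getD 0 []) ['/']).getD 0 []
      = b.takeWhile (fun c => !(c == '/' || c == '?')) := by
  rw [pv_getD0 _ (pv_splitOn_ne_nil _ _), pv_getD0 _ (pv_splitOn_ne_nil _ _),
      pv_splitOn_head, pv_splitOn_head, List.takeWhile_takeWhile]
  have hfun : (fun a => decide ((!(a == '/')) = true ∧ (!(a == '?')) = true))
      = (fun c : Char => !(c == '/' || c == '?')) := by
    funext x; cases hx : x == '/' <;> cases hy : x == '?' <;> simp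
  rw [hfun]
  by_cases hb : PySem.Chars.isIn pvPl b = true
  · have hinf : pvPl <:+: b := (PySem.Chars.isIn_iff_infix pvPl b).mp hb
    have hnn : 0 ≤ PySem.Chars.find b pvPl := (PySem.Chars.find_nonneg_iff b pvPl).mpr hinf
    obtain ⟨hpre, hmin⟩ := PySem.Chars.find_spec hnn
    set k' := (PySem.Chars.find b pvPl).toNat with hk'
    rw [pv_splitOn_first pvPl (by simp [pvPl]) k' b
          (List.isPrefixOf_iff_prefix.mpr hpre)
          (fun j hj => Bool.eq_false_iff.mpr
            (fun hc => hmin j hj (List.isPrefixOf_iff_prefix.mp hc)))]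
    simp only [List.headI_cons]
    apply pv_takeWhile_take
    intro h
    obtain ⟨t, ht⟩ := hpre
    have h0 : 0 < (List.drop k' b).length := by rw [← ht]; simp [pvPl]
    have e1 : (List.drop k' b)[0] = b[k' + 0] := List.getElem_drop (h := h0)
    have e2 : (List.drop k' b)[0]'h0 = (pvPl ++ t)[0]'(by rw [ht]; exact h0) :=
      List.getElem_of_eq ht.symm h0
    have e3 : (pvPl ++ t)[0]'(by simp [pvPl]) = '/' := by simp [pvPl]
    have : b[k'] = '/' := by
      have := e1.symm.trans (e2.trans e3)
      simpa using this
    rw [this]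
    rfl
  · have hb' : PySem.Chars.isIn pvPl b = false := by simpa using hb
    rw [pv_splitOn_none pvPl (by simp [pvPl]) b (fun j => Bool.eq_false_iff.mpr
      (fun hc => hb ((PySem.Chars.exists_prefix_drop_iff_isIn pvPl b).mp
        ⟨j, List.isPrefixOf_iff_prefix.mp hc⟩)))]
    simp

theorem pv_main (url : String) : extract_playlist_id url = extract_playlist_id_alt url := by
  unfold extract_playlist_id extract_playlist_id_alt
  set u := pvClean url with hu
  by_cases hin : PySem.Chars.isIn pvPl u = true
  · -- "/playlist/" occurs: A takes its first branch, B its find branch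
    have hinf : pvPl <:+: u := (PySem.Chars.isIn_iff_infix pvPl u).mp hin
    have hnn : 0 ≤ PySem.Chars.find u pvPl := (PySem.Chars.find_nonneg_iff u pvPl).mpr hinf
    obtain ⟨hpre, hmin⟩ := PySem.Chars.find_spec hnn
    set k := (PySem.Chars.find u pvPl).toNat with hk
    have hne : (PySem.Chars.find u pvPl == -1) = false := by
      have : ¬ PySem.Chars.find u pvPl = -1 := by omega
      simpa using this
    simp only [hin, hne, if_true, Bool.false_eq_true, if_false]
    rw [pv_splitOn_first pvPl (by simp [pvPl]) k u
          (List.isPrefixOf_iff_prefix.mpr hpre)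
          (fun j hj => Bool.eq_false_iff.mpr
            (fun hc => hmin j hj (List.isPrefixOf_iff_prefix.mp hc)))]
    have hlen : k + pvPl.length = k + 10 := rfl
    rw [hlen]
    have hgd : ∀ (x : List Char) (S : List (List Char)), (x :: S).getD 1 [] = S.getD 0 [] :=
      fun x S => rfl
    rw [hgd, pv_getD0 (PySem.Chars.splitOn (List.drop (k + 10) u) pvPl) (pv_splitOn_ne_nil _ _), pv_chain]
  · have hin' : PySem.Chars.isIn pvPl u = false := by simpa using hin
    have hbpl : PySem.Chars.isIn pvBpl u = false := by
      apply Bool.eq_false_iff.mpr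
      intro hc
      have h1 : pvPl <:+: pvBpl := ⟨['/', 'b', 'r', 'o', 'w', 's', 'e'], [], by rfl⟩
      have h2 : pvBpl <:+: u := (PySem.Chars.isIn_iff_infix pvBpl u).mp hc
      exact hin ((PySem.Chars.isIn_iff_infix pvPl u).mpr (h1.trans h2))
    have hfind : (PySem.Chars.find u pvPl == -1) = true := by
      have := (PySem.Chars.find_eq_neg_one_iff u pvPl).mpr
        ((PySem.Chars.isIn_eq_false_iff pvPl u).mp hin')
      simpa using this
    simp only [hin', hbpl, hfind, Bool.false_eq_true, if_false, if_true, ite_self]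

-- ===== VERDICT (by name: the statement is the Claim_ definition above) =====
theorem extract_playlist_id_spec : Claim_equal_extract_playlist_id := by
  intro url _
  exact pv_main url
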